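-- pv_equiv track=rewrite | github.com/zdjuna/music-recommendation-system | scripts/enrichers/discogs_enricher.py | _classify_mood_from_genres
-- ===== SOURCE A (Python) =====
-- from typing import Dict, List, Optional, Any
--
-- def _classify_mood_from_genres(genres: List[str], styles: List[str]) -> str:
--     """Classify mood based on genres and styles"""
--     all_tags = [tag.lower() for tag in (genres + styles)]
--
--     # Define mood mappings
--     mood_mappings = {
--         'energetic': ['rock', 'punk', 'metal', 'electronic', 'dance', 'techno', 'house', 'drum n bass'],
--         'calm': ['ambient', 'classical', 'new age', 'folk', 'acoustic', 'meditation'],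
--         'happy': ['pop', 'disco', 'funk', 'soul', 'reggae', 'ska'],
--         'melancholic': ['blues', 'country', 'indie', 'alternative', 'post-rock'],
--         'aggressive': ['hardcore', 'metal', 'punk', 'industrial', 'noise'],
--         'romantic': ['r&b', 'soul', 'jazz', 'bossa nova', 'lounge']
--     }
--
--     mood_scores = {}
--     for mood, keywords in mood_mappings.items():
--         score = sum(1 for tag in all_tags if any(keyword in tag for keyword in keywords))
--         if score > 0:
--             mood_scores[mood] = score
--
--     if mood_scores:
--         return max(mood_scores.keys(), key=lambda k: mood_scores[k])
--     return 'neutral'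
-- ===== SOURCE B (Python) =====
-- from typing import List
--
-- # Inverted index: keyword -> moods it scores for (shared keywords merged once).
-- KW_INDEX = {
--     'rock': ['energetic'],
--     'punk': ['energetic', 'aggressive'],
--     'metal': ['energetic', 'aggressive'],
--     'electronic': ['energetic'],
--     'dance': ['energetic'],
--     'techno': ['energetic'],
--     'house': ['energetic'],
--     'drum n bass': ['energetic'],
--     'ambient': ['calm'],
--     'classical': ['calm'],
--     'new age': ['calm'],
--     'folk': ['calm'],
--     'acoustic': ['calm'],
--     'meditation': ['calm'],
--     'pop': ['happy'],
--     'disco': ['happy'],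
--     'funk': ['happy'],
--     'soul': ['happy', 'romantic'],
--     'reggae': ['happy'],
--     'ska': ['happy'],
--     'blues': ['melancholic'],
--     'country': ['melancholic'],
--     'indie': ['melancholic'],
--     'alternative': ['melancholic'],
--     'post-rock': ['melancholic'],
--     'hardcore': ['aggressive'],
--     'industrial': ['aggressive'],
--     'noise': ['aggressive'],
--     'r&b': ['romantic'],
--     'jazz': ['romantic'],
--     'bossa nova': ['romantic'],
--     'lounge': ['romantic'],
-- }
--
-- MOODS = ['energetic', 'calm', 'happy', 'melancholic', 'aggressive', 'romantic']
--
--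
-- def _matched_moods(t: str) -> set:
--     """Set of moods any of whose keywords occur in the (lowercased) tag t."""
--     s = set()
--     for kw, moods in KW_INDEX.items():
--         if kw in t:
--             s.update(moods)
--     return s
--
--
-- def _classify_mood_from_genres(genres: List[str], styles: List[str]) -> str:
--     """Classify mood based on genres and styles (inverted-index pipeline)."""
--     matched = [_matched_moods(tag.lower()) for tag in genres + styles]
--     best, best_score = 'neutral', 0
--     for mood in MOODS:
--         score = sum(1 for s in matched if mood in s)
--         if score > best_score:
--             best, best_score = mood, score
--     return best
-- ===== Notes on version B (the rewrite author's own statement) =====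
-- stated objective: alternative
-- what changed: Replaces A's mood-major keyword scan with an inverted keyword-to-moods index (shared keywords merged once): one pass turns each tag into a set of matched moods, then each mood's score is the count of tag-sets containing it, selected by a running-best scan seeded with ('neutral', 0) which reproduces the score>0 filter and first-max tie-break; fewer substring tests per tag (32 deduplicated keywords vs 35 with repeats, and no per-mood re-scan of tags).
import Mathlib
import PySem

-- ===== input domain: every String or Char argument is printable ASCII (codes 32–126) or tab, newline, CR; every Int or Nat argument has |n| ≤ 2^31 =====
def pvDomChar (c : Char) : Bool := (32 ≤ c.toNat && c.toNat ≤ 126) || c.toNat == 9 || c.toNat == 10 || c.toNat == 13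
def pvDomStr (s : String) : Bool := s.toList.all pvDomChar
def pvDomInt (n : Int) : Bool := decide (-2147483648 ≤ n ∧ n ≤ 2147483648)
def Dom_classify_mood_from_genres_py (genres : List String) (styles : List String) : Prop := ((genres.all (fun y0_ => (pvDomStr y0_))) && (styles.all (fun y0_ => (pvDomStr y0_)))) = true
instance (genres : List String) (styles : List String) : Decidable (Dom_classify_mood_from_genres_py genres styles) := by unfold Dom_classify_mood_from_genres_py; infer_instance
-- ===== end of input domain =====

-- B replaces A's mood-major keyword scan with an inverted keyword→moods index: each tag becomes a
-- set of matched moods, each mood's score is the count of tag-sets containing it, and a running-best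
-- scan seeded ("neutral", 0) selects the answer; objective: alternative, same cost.

-- ===== PORT A =====
def pvMoodMappings : List (String × List String) :=
  [("energetic", ["rock", "punk", "metal", "electronic", "dance", "techno", "house", "drum n bass"]),
   ("calm", ["ambient", "classical", "new age", "folk", "acoustic", "meditation"]),
   ("happy", ["pop", "disco", "funk", "soul", "reggae", "ska"]),
   ("melancholic", ["blues", "country", "indie", "alternative", "post-rock"]),
   ("aggressive", ["hardcore", "metal", "punk", "industrial", "noise"]),
   ("romantic", ["r&b", "soul", "jazz", "bossa nova", "lounge"])]

def classify_mood_from_genres_py (genres : List String) (styles : List String) : String :=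
  let all_tags := (genres ++ styles).map (fun tag => PySem.Str.lower tag)
  let mood_scores : PySem.Dict String Int :=
    pvMoodMappings.foldl (fun d p =>
        let score : Int := all_tags.foldl
          (fun s tag => if p.2.any (fun keyword => PySem.Str.isIn keyword tag) then s + 1 else s) 0
        if score > 0 then d.insert p.1 score else d)
      PySem.Dict.empty
  if mood_scores.items ≠ [] then
    match PySem.List.max? mood_scores.keys (fun k => mood_scores.getD k 0) with
    | some m => m
    | none => "neutral"
  else "neutral"

-- ===== PORT B =====
-- inverted index: keyword → the moods it scores for (shared keywords merged once)
def pvKwIndex : List (String × List String) :=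
  [("rock", ["energetic"]), ("punk", ["energetic", "aggressive"]), ("metal", ["energetic", "aggressive"]),
   ("electronic", ["energetic"]), ("dance", ["energetic"]), ("techno", ["energetic"]),
   ("house", ["energetic"]), ("drum n bass", ["energetic"]),
   ("ambient", ["calm"]), ("classical", ["calm"]), ("new age", ["calm"]), ("folk", ["calm"]),
   ("acoustic", ["calm"]), ("meditation", ["calm"]),
   ("pop", ["happy"]), ("disco", ["happy"]), ("funk", ["happy"]), ("soul", ["happy", "romantic"]),
   ("reggae", ["happy"]), ("ska", ["happy"]),
   ("blues", ["melancholic"]), ("country", ["melancholic"]), ("indie", ["melancholic"]),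
   ("alternative", ["melancholic"]), ("post-rock", ["melancholic"]),
   ("hardcore", ["aggressive"]), ("industrial", ["aggressive"]), ("noise", ["aggressive"]),
   ("r&b", ["romantic"]), ("jazz", ["romantic"]), ("bossa nova", ["romantic"]), ("lounge", ["romantic"])]

def pvMoods : List String := ["energetic", "calm", "happy", "melancholic", "aggressive", "romantic"]

-- set of moods any of whose keywords occur in the (lowercased) tag t
def pvMatchedMoods (t : String) : PySem.Set String :=
  pvKwIndex.foldl (fun s p => if PySem.Str.isIn p.1 t then PySem.Set.update s p.2 else s)
    PySem.Set.empty

def classify_mood_from_genres_py_alt (genres : List String) (styles : List String) : String :=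
  let matched : List (PySem.Set String) :=
    (genres ++ styles).map (fun tag => pvMatchedMoods (PySem.Str.lower tag))
  (pvMoods.foldl (fun (best : String × Int) mood =>
      let score : Int :=
        matched.foldl (fun n s => if PySem.Set.contains s mood then n + 1 else n) 0
      if score > best.2 then (mood, score) else best)
    ("neutral", 0)).1

-- ===== PRECONDITION & SPEC =====
def Spec_classify_mood_from_genres_py (genres : List String) (styles : List String) (out : String) : Prop := out = classify_mood_from_genres_py_alt genres styles
instance (genres : List String) (styles : List String) (out : String) : Decidable (Spec_classify_mood_from_genres_py genres styles out) := by unfold Spec_classify_mood_from_genres_py; infer_instance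

-- ===== CLAIM (what is proved, stated in full; the proofs are below) =====
def Claim_equal_classify_mood_from_genres_py : Prop := ∀ (genres : List String) (styles : List String), Dom_classify_mood_from_genres_py genres styles → Spec_classify_mood_from_genres_py genres styles (classify_mood_from_genres_py genres styles)

-- ===== LEMMAS AND PROOFS =====

-- count of tags hit by a keyword list (the value A's inner sum computes)
def pvCnt (ts : List String) (kws : List String) : Int :=
  ts.foldl (fun s tag => if kws.any (fun kw => PySem.Str.isIn kw tag) then s + 1 else s) 0

-- first-maximum selection over scored pairs (Option form, as A's max? computes)
def pvSelStep (acc : Option (String × Int)) (pc : String × Int) : Option (String × Int) :=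
  match acc with
  | none => some pc
  | some m => if m.2 < pc.2 then some pc else some m

def pvBestStep (best : String × Int) (pc : String × Int) : String × Int :=
  if pc.2 > best.2 then pc else best

theorem pv_dict_items (ts : List String) (l : List (String × List String))
    (d : PySem.Dict String Int)
    (hfresh : ∀ p ∈ l, d.contains p.1 = false)
    (hnd : (l.map Prod.fst).Nodup) :
    (l.foldl (fun d p =>
        let score : Int := ts.foldl
          (fun s tag => if p.2.any (fun kw => PySem.Str.isIn kw tag) then s + 1 else s) 0
        if score > 0 then d.insert p.1 score else d) d).items
      = d.items ++ (l.map (fun p => (p.1, pvCnt ts p.2))).filter (fun pc => decide (0 < pc.2)) := by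
  induction l generalizing d with
  | nil => simp
  | cons p l ih =>
      have hcnt : (ts.foldl (fun s tag => if p.2.any (fun kw => PySem.Str.isIn kw tag) then s + 1 else s) 0) = pvCnt ts p.2 := rfl
      simp only [List.foldl_cons, List.map_cons, List.filter_cons, hcnt]
      by_cases hpos : 0 < pvCnt ts p.2
      · simp only [gt_iff_lt, hpos, if_pos, decide_true]
        have hdc : d.contains p.1 = false := hfresh p (List.mem_cons_self ..)
        have hins : (d.insert p.1 (pvCnt ts p.2)).items = d.items ++ [(p.1, pvCnt ts p.2)] :=
          PySem.Dict.items_insert_of_not_contains d (pvCnt ts p.2) hdc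
        rw [ih]
        · rw [hins]; simp
        · intro q hq
          have hne : q.1 ≠ p.1 := by
            simp only [List.map_cons, List.nodup_cons] at hnd
            intro he; exact hnd.1 (he ▸ List.mem_map_of_mem hq)
          rw [PySem.Dict.contains_insert]
          simp [hne, hfresh q (List.mem_cons_of_mem _ hq)]
        · simp only [List.map_cons, List.nodup_cons] at hnd; exact hnd.2
      · simp only [gt_iff_lt, hpos, if_neg, not_false_iff, decide_false]
        rw [ih]
        · simp
        · exact fun q hq => hfresh q (List.mem_cons_of_mem _ hq)
        · simp only [List.map_cons, List.nodup_cons] at hnd; exact hnd.2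

theorem pv_max_eq_foldl (xs : List String) (key : String → Int) :
    PySem.List.max? xs key
      = xs.foldl (fun acc x =>
          match acc with
          | none => some x
          | some m => if key m < key x then some x else some m) none := by
  unfold PySem.List.max?
  congr 1
  funext acc x
  cases acc <;> rfl

theorem pv_max_aux (d : PySem.Dict String Int) (l : List (String × Int))
    (hval : ∀ pc ∈ l, d.getD pc.1 0 = pc.2) :
    ∀ acc : Option (String × Int), (∀ m, acc = some m → d.getD m.1 0 = m.2) →
      (l.map Prod.fst).foldl
          (fun acc x =>
            match acc with
            | none => some x
            | some m => if d.getD m 0 < d.getD x 0 then some x else some m)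
          (acc.map Prod.fst)
        = (l.foldl pvSelStep acc).map Prod.fst := by
  induction l with
  | nil => intro acc _; simp
  | cons pc l ih =>
      intro acc hacc
      have hpc : d.getD pc.1 0 = pc.2 := hval pc (List.mem_cons_self ..)
      have hval' : ∀ q ∈ l, d.getD q.1 0 = q.2 := fun q hq => hval q (List.mem_cons_of_mem _ hq)
      cases acc with
      | none =>
          simp only [List.map_cons, List.foldl_cons, Option.map_none, pvSelStep]
          exact ih hval' (some pc) (by intro q hq; injection hq with h; exact h ▸ hpc)
      | some m =>
          have hm : d.getD m.1 0 = m.2 := hacc m rfl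
          simp only [List.map_cons, List.foldl_cons, Option.map_some, pvSelStep, hm, hpc]
          by_cases hlt : m.2 < pc.2
          · simp only [hlt, if_pos]
            exact ih hval' (some pc) (by intro q hq; injection hq with h; exact h ▸ hpc)
          · simp only [hlt, if_neg, not_false_iff]
            exact ih hval' (some m) (by intro q hq; injection hq with h; exact h ▸ hm)

theorem pv_sel_some (l : List (String × Int)) :
    ∀ m : String × Int, l.foldl pvSelStep (some m) = some (l.foldl pvBestStep m) := by
  induction l with
  | nil => intro m; rfl
  | cons pc l ih =>
      intro m
      simp only [List.foldl_cons, pvSelStep, pvBestStep, gt_iff_lt]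
      split <;> exact ih _

theorem pv_best_filter (l : List (String × Int)) :
    ∀ b : String × Int, 0 ≤ b.2 →
      l.foldl pvBestStep b = (l.filter (fun pc => decide (0 < pc.2))).foldl pvBestStep b := by
  induction l with
  | nil => intro b _; rfl
  | cons pc l ih =>
      intro b hb
      by_cases hpos : 0 < pc.2
      · simp only [List.filter_cons, hpos, decide_true, if_pos, List.foldl_cons]
        apply ih
        simp only [pvBestStep, gt_iff_lt]
        split <;> omega
      · have hskip : pvBestStep b pc = b := by
          simp only [pvBestStep, gt_iff_lt]; rw [if_neg]; omega
        simp only [List.filter_cons, hpos, decide_false, List.foldl_cons, hskip]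
        exact ih b hb

-- membership in the matched-mood set built over an index prefix
theorem pv_mem_matched (t m : String) (l : List (String × List String)) :
    ∀ s : PySem.Set String,
      (m ∈ l.foldl (fun s p => if PySem.Str.isIn p.1 t then PySem.Set.update s p.2 else s) s
        ↔ m ∈ s ∨ ∃ p ∈ l, PySem.Str.isIn p.1 t = true ∧ m ∈ p.2) := by
  induction l with
  | nil => intro s; simp
  | cons p l ih =>
      intro s
      simp only [List.foldl_cons]
      by_cases h : PySem.Str.isIn p.1 t = true
      · rw [if_pos h, ih, PySem.Set.mem_update]
        simp
        tauto
      · rw [if_neg h, ih]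
        simp only [List.mem_cons]
        constructor
        · rintro (hs | ⟨q, hq, hin, hm⟩)
          · exact Or.inl hs
          · exact Or.inr ⟨q, Or.inr hq, hin, hm⟩
        · rintro (hs | ⟨q, hq | hq, hin, hm⟩)
          · exact Or.inl hs
          · exact absurd (hq ▸ hin) h
          · exact Or.inr ⟨q, hq, hin, hm⟩

-- the matched-mood set answers exactly A's keyword test, for each of the six moods
theorem pv_matched_en (t : String) :
    PySem.Set.contains (pvMatchedMoods t) "energetic"
      = (["rock", "punk", "metal", "electronic", "dance", "techno", "house", "drum n bass"]).any
          (fun kw => PySem.Str.isIn kw t) := by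
  rw [Bool.eq_iff_iff, PySem.Set.contains_iff, pvMatchedMoods, pv_mem_matched]
  simp [pvKwIndex, PySem.Set.empty]


theorem pv_matched_calm (t : String) :
    PySem.Set.contains (pvMatchedMoods t) "calm"
      = (["ambient", "classical", "new age", "folk", "acoustic", "meditation"]).any
          (fun kw => PySem.Str.isIn kw t) := by
  rw [Bool.eq_iff_iff, PySem.Set.contains_iff, pvMatchedMoods, pv_mem_matched]
  simp [pvKwIndex, PySem.Set.empty]


theorem pv_matched_happy (t : String) :
    PySem.Set.contains (pvMatchedMoods t) "happy"
      = (["pop", "disco", "funk", "soul", "reggae", "ska"]).any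
          (fun kw => PySem.Str.isIn kw t) := by
  rw [Bool.eq_iff_iff, PySem.Set.contains_iff, pvMatchedMoods, pv_mem_matched]
  simp [pvKwIndex, PySem.Set.empty]


theorem pv_matched_mel (t : String) :
    PySem.Set.contains (pvMatchedMoods t) "melancholic"
      = (["blues", "country", "indie", "alternative", "post-rock"]).any
          (fun kw => PySem.Str.isIn kw t) := by
  rw [Bool.eq_iff_iff, PySem.Set.contains_iff, pvMatchedMoods, pv_mem_matched]
  simp [pvKwIndex, PySem.Set.empty]


theorem pv_matched_agg (t : String) :
    PySem.Set.contains (pvMatchedMoods t) "aggressive"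
      = (["hardcore", "metal", "punk", "industrial", "noise"]).any
          (fun kw => PySem.Str.isIn kw t) := by
  rw [Bool.eq_iff_iff, PySem.Set.contains_iff, pvMatchedMoods, pv_mem_matched]
  simp [pvKwIndex, PySem.Set.empty]
  tauto

theorem pv_matched_rom (t : String) :
    PySem.Set.contains (pvMatchedMoods t) "romantic"
      = (["r&b", "soul", "jazz", "bossa nova", "lounge"]).any
          (fun kw => PySem.Str.isIn kw t) := by
  rw [Bool.eq_iff_iff, PySem.Set.contains_iff, pvMatchedMoods, pv_mem_matched]
  simp [pvKwIndex, PySem.Set.empty]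
  tauto

-- B's per-mood score over the matched-set list equals A's count, given the membership bridge
theorem pv_score_eq (tags : List String) (mood : String) (kws : List String)
    (h : ∀ t, PySem.Set.contains (pvMatchedMoods t) mood
          = kws.any (fun kw => PySem.Str.isIn kw t)) :
    (tags.map (fun tag => pvMatchedMoods (PySem.Str.lower tag))).foldl
        (fun n s => if PySem.Set.contains s mood then n + 1 else n) (0 : Int)
      = pvCnt (tags.map (fun tag => PySem.Str.lower tag)) kws := by
  rw [List.foldl_map]
  unfold pvCnt
  rw [List.foldl_map]
  congr 1
  funext n tag
  rw [h]

-- the common normal form of both programs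
theorem pv_both (genres styles : List String) :
    classify_mood_from_genres_py genres styles = classify_mood_from_genres_py_alt genres styles := by
  set ts := (genres ++ styles).map (fun tag => PySem.Str.lower tag) with hts
  set pairs := pvMoodMappings.map (fun p => (p.1, pvCnt ts p.2)) with hpairs
  set filtered := pairs.filter (fun pc => decide (0 < pc.2)) with hfiltered
  -- A side: the score dict's items are exactly the positive (mood, count) pairs
  have hnd : (pvMoodMappings.map Prod.fst).Nodup := by decide
  set d := pvMoodMappings.foldl (fun d p =>
      let score : Int := ts.foldl
        (fun s tag => if p.2.any (fun kw => PySem.Str.isIn kw tag) then s + 1 else s) 0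
      if score > 0 then d.insert p.1 score else d) PySem.Dict.empty with hd
  have hitems : d.items = filtered := by
    rw [hd, pv_dict_items ts pvMoodMappings PySem.Dict.empty (by simp) hnd]
    rfl
  have hkeys : d.keys = filtered.map Prod.fst := by
    simp only [PySem.Dict.keys, hitems]
  have hkeysnd : d.keys.Nodup := by
    rw [hkeys, hfiltered, hpairs]
    refine List.Nodup.sublist (List.Sublist.map Prod.fst List.filter_sublist) ?_
    simpa [List.map_map, Function.comp] using hnd
  have hval : ∀ pc ∈ filtered, d.getD pc.1 0 = pc.2 := by
    intro pc hpc
    have hget : d.get? pc.1 = some pc.2 :=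
      PySem.Dict.get?_of_mem_items d (by rw [hitems]; exact hpc) hkeysnd
    simp [PySem.Dict.getD, hget]
  -- B side: each mood's score is pvCnt of its keyword list; the best scan runs over the pairs
  have hB :
      classify_mood_from_genres_py_alt genres styles
        = (filtered.foldl pvBestStep ("neutral", 0)).1 := by
    simp only [classify_mood_from_genres_py_alt, pvMoods, List.foldl_cons, List.foldl_nil]
    rw [pv_score_eq _ _ _ pv_matched_en, pv_score_eq _ _ _ pv_matched_calm,
        pv_score_eq _ _ _ pv_matched_happy, pv_score_eq _ _ _ pv_matched_mel,
        pv_score_eq _ _ _ pv_matched_agg, pv_score_eq _ _ _ pv_matched_rom]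
    rw [hfiltered, ← pv_best_filter pairs _ (by norm_num), hpairs]
    simp only [pvMoodMappings, List.map_cons, List.map_nil, List.foldl_cons, List.foldl_nil, ← hts]
    rfl
  -- assemble
  show (if d.items ≠ [] then
      match PySem.List.max? d.keys (fun k => d.getD k 0) with
      | some m => m
      | none => "neutral"
    else "neutral") = _
  rw [hB, hitems]
  cases hf : filtered with
  | nil => simp
  | cons p rest =>
      have hppos : 0 < p.2 := by
        have : p ∈ filtered := hf ▸ List.mem_cons_self ..
        simpa using (List.mem_filter.mp this).2
      have hmax : PySem.List.max? d.keys (fun k => d.getD k 0)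
          = (filtered.foldl pvSelStep none).map Prod.fst := by
        rw [hkeys, pv_max_eq_foldl]
        exact pv_max_aux d filtered hval none (fun m h => by cases h)
      have hsel : filtered.foldl pvSelStep none = some (rest.foldl pvBestStep p) := by
        rw [hf]
        simp only [List.foldl_cons, pvSelStep]
        exact pv_sel_some rest p
      have hbest : List.foldl pvBestStep ("neutral", 0) (p :: rest) = rest.foldl pvBestStep p := by
        simp only [List.foldl_cons, pvBestStep, gt_iff_lt]
        rw [if_pos hppos]
      rw [hmax, hsel, hbest]
      simp

-- ===== VERDICT (by name: the statement is the Claim_ definition above) =====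
theorem classify_mood_from_genres_py_spec : Claim_equal_classify_mood_from_genres_py := by
  intro genres styles _
  unfold Spec_classify_mood_from_genres_py
  exact pv_both genres styles
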